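-- pv_equiv track=rewrite | github.com/SherzodOtajonov/cp-stuff | codeforces/2021/problemset/wizard_of_orz.py | solve
-- ===== SOURCE A (Python) =====
-- def solve(n):
--     l = ['0', '1', '2', '3', '4', '5', '6', '7', '8', '9']
--     res = ['9', '8', '9', '0']
--
--     if n < 4:
--         return ''.join(res[:n])
--     res.pop()
--     for i in range(n-3):
--         res.append(l[i%len(l)])
--     return ''.join(res)
-- ===== SOURCE B (Python) =====
-- def solve(n):
--     if n < 4:
--         return '9890'[:n]
--     return ('989' + '0123456789' * (n // 10 + 1))[:n]
-- ===== Notes on version B (the rewrite author's own statement) =====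
-- stated objective: faster
-- what changed: Replaces A's per-character append loop with a closed-form build: slice the fixed prefix for short lengths, otherwise concatenate the prefix with enough repetitions of the ten-digit block and truncate.
import Mathlib
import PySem

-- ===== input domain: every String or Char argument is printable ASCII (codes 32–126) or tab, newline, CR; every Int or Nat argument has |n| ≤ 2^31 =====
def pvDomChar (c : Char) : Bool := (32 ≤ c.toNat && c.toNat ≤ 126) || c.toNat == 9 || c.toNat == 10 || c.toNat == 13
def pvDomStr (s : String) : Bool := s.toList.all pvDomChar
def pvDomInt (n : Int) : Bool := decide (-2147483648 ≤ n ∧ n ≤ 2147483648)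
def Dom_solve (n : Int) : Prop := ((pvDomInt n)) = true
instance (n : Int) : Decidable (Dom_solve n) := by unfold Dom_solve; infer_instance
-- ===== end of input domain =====

-- B replaces A's append-one-digit-per-iteration loop by a closed-form
-- replicate-then-truncate string construction (objective: idiomatic/alternative).

-- ===== PORT A =====
-- the loop index i%10 is always in range, so pyGetD's default ' ' is never used
def solve (n : Int) : String :=
  let l : List Char := ['0','1','2','3','4','5','6','7','8','9']
  let res : List Char := ['9','8','9','0']
  if n < 4 then String.mk (PySem.List.slice res none (some n))
  else
    let res1 := res.dropLast                -- res.pop()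
    let res2 := (PySem.List.pyRange 0 (n - 3) 1).foldl
      (fun acc i => acc ++ [PySem.List.pyGetD l (PySem.Int.mod i 10) ' ']) res1
    String.mk res2

-- ===== PORT B =====
def solve_alt (n : Int) : String :=
  if n < 4 then String.mk (PySem.List.slice "9890".toList none (some n))
  else
    String.mk (PySem.List.slice
      ("989".toList ++ (List.replicate (PySem.Int.floordiv n 10 + 1).toNat "0123456789".toList).flatten)
      none (some n))

-- ===== PRECONDITION & SPEC =====
def Spec_solve (n : Int) (out : String) : Prop := out = solve_alt n
instance (n : Int) (out : String) : Decidable (Spec_solve n out) := by unfold Spec_solve; infer_instance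

-- ===== CLAIM (what is proved, stated in full; the proofs are below) =====
def Claim_equal_solve : Prop := ∀ (n : Int), Dom_solve n → Spec_solve n (solve n)

-- ===== LEMMAS AND PROOFS =====

-- element k of a K-fold repetition of the digit list is digit k % 10
lemma cyc_getElem (K k : Nat) (hk : k < 10 * K) :
    ((List.replicate K "0123456789".toList).flatten).getD k ' ' =
      ("0123456789".toList).getD (k % 10) ' ' := by
  induction K generalizing k with
  | zero => omega
  | succ K ih =>
      rw [List.replicate_succ, List.flatten_cons]
      have hlen10 : ("0123456789".toList).length = 10 := by decide
      by_cases h : k < 10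
      · rw [List.getD_append _ _ _ _ (by omega)]
        rw [Nat.mod_eq_of_lt h]
      · have hk10 : 10 ≤ k := by omega
        rw [List.getD_append_right _ _ _ _ (by omega)]
        rw [hlen10, ih (k - 10) (by omega)]
        congr 1
        omega

lemma take_cyc (m K : Nat) (hm : m ≤ 10 * K) :
    ((List.replicate K "0123456789".toList).flatten).take m =
      (List.range m).map (fun k => ("0123456789".toList).getD (k % 10) ' ') := by
  apply List.ext_getElem
  · simp [List.length_take, List.length_flatten]
    omega
  · intro k h1 h2
    have hk : k < m := by simpa using h2
    rw [List.getElem_take]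
    have hkK : k < 10 * K := by omega
    have := cyc_getElem K k hkK
    rw [List.getD_eq_getElem _ _ (by simp [List.length_flatten]; omega)] at this
    simp only [List.getElem_map, List.getElem_range]
    rw [this]

-- ===== VERDICT (by name: the statement is the Claim_ definition above) =====
theorem solve_spec : Claim_equal_solve := by
  intro n _
  unfold Spec_solve solve solve_alt
  by_cases h : n < 4
  · simp [h]
  · simp only [h, if_false]
    push_neg at h
    obtain ⟨m, hm⟩ : ∃ m : Nat, (n : Int) = (m : Int) + 3 := ⟨(n - 3).toNat, by omega⟩
    have hK : ∃ K : Nat, PySem.Int.floordiv n 10 + 1 = (K : Int) ∧ (m ≤ 10 * K) := by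
      refine ⟨(PySem.Int.floordiv n 10 + 1).toNat, ?_, ?_⟩
      · have h0 : (0:Int) ≤ PySem.Int.floordiv n 10 := by
          rw [PySem.Int.floordiv_eq_ediv_of_pos (by norm_num)]
          omega
        omega
      · have := PySem.Int.floordiv_mul_add_mod n 10
        have hlt := PySem.Int.mod_lt n (b := 10) (by norm_num)
        have hge := PySem.Int.mod_nonneg n (b := 10) (by norm_num)
        have h0 : (0:Int) ≤ PySem.Int.floordiv n 10 := by
          rw [PySem.Int.floordiv_eq_ediv_of_pos (by norm_num)]
          omega
        omega
    obtain ⟨K, hKeq, hmK⟩ := hK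
    rw [hKeq, Int.toNat_natCast]
    rw [PySem.List.foldl_append_singleton_eq_map]
    rw [PySem.List.pyRange_one]
    have hlen : (n - 3 - 0).toNat = m := by omega
    rw [hlen]
    simp only [List.map_map, Function.comp_def, zero_add]
    have hmap : (List.range m).map (fun k : Nat => PySem.List.pyGetD ['0','1','2','3','4','5','6','7','8','9'] (PySem.Int.mod (k : Int) 10) ' ') =
        (List.range m).map (fun k => ("0123456789".toList).getD (k % 10) ' ') := by
      apply List.map_congr_left
      intro k _
      have hmod : PySem.Int.mod (k : Int) 10 = ((k % 10 : Nat) : Int) := by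
        rw [PySem.Int.mod_eq_emod_of_pos (b := 10) (by norm_num)]
        omega
      rw [hmod, PySem.List.pyGetD_natCast]
      rfl
    rw [hmap]
    have hslice : PySem.List.slice ("989".toList ++ (List.replicate K "0123456789".toList).flatten) none (some n) =
        "989".toList ++ ((List.replicate K "0123456789".toList).flatten).take m := by
      rw [PySem.List.slice_to _ (by omega)]
      rw [List.take_append]
      have h3 : n.toNat - ("989".toList).length = m := by
        have : ("989".toList).length = 3 := by decide
        omega
      have h3' : ("989".toList).take n.toNat = "989".toList := by
        apply List.take_of_length_le
        have : ("989".toList).length = 3 := by decide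
        omega
      rw [h3, h3']
    rw [hslice, take_cyc m K hmK]
    rfl
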